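-- pv_equiv track=rewrite | github.com/Jaiashar/vora-business-finder | InvestorOutreach/test_playwright_angels.py | is_useful_email
-- ===== SOURCE A (Python) =====
-- JUNK_PREFIXES = {'info@', 'hello@', 'contact@', 'support@', 'admin@', 'press@',
--                  'media@', 'jobs@', 'careers@', 'noreply@', 'no-reply@', 'webmaster@',
--                  'team@', 'office@', 'general@', 'help@', 'feedback@', 'privacy@'}
--
-- JUNK_DOMAINS = {'example.com', 'sentry.io', 'w3.org', 'schema.org',
--                 'wordpress.org', 'gravatar.com', 'wixpress.com', 'google.com',
--                 'cloudflare.com', 'gstatic.com', 'facebook.com'}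
--
-- def is_useful_email(email):
--     email = email.lower()
--     for p in JUNK_PREFIXES:
--         if email.startswith(p):
--             return False
--     domain = email.split('@')[1] if '@' in email else ''
--     if domain in JUNK_DOMAINS:
--         return False
--     if email.endswith(('.png', '.jpg', '.svg', '.gif')):
--         return False
--     return True
-- ===== SOURCE B (Python) =====
-- JUNK_PREFIXES = {'info@', 'hello@', 'contact@', 'support@', 'admin@', 'press@',
--                  'media@', 'jobs@', 'careers@', 'noreply@', 'no-reply@', 'webmaster@',
--                  'team@', 'office@', 'general@', 'help@', 'feedback@', 'privacy@'}
--
-- JUNK_DOMAINS = {'example.com', 'sentry.io', 'w3.org', 'schema.org',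
--                 'wordpress.org', 'gravatar.com', 'wixpress.com', 'google.com',
--                 'cloudflare.com', 'gstatic.com', 'facebook.com'}
--
-- def is_useful_email(email):
--     e = email.lower()
--     parts = e.split('@')
--     junk = (len(parts) > 1 and parts[0] + '@' in JUNK_PREFIXES) \
--         or (parts[1] if len(parts) > 1 else '') in JUNK_DOMAINS \
--         or e.endswith(('.png', '.jpg', '.svg', '.gif'))
--     return not junk
-- ===== Notes on version B (the rewrite author's own statement) =====
-- stated objective: simpler
-- what changed: Replaces the 18-way startswith scan with one split at the at-sign followed by a single set lookup on the reconstructed local-part key (valid because every junk prefix ends in the at-sign), and folds the three checks into one boolean expression.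
import Mathlib
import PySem

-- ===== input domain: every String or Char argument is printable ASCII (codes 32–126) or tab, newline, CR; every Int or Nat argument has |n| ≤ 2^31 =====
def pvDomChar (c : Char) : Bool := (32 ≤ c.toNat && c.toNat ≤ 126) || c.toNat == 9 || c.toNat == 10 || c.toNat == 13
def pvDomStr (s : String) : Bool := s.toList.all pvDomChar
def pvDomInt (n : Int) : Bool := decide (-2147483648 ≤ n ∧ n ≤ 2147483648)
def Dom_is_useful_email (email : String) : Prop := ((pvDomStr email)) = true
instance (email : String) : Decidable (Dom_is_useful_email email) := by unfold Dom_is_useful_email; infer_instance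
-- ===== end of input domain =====

-- B replaces A's 18-way startswith scan with one split at the at-sign and a single membership
-- test on the reconstructed local-part key (every junk prefix ends in the at-sign); simpler, same cost.

-- module constants (shared by both ports, like the Python module-level sets)
def junkPrefixes : List (List Char) :=
  ["info@".toList, "hello@".toList, "contact@".toList, "support@".toList, "admin@".toList,
   "press@".toList, "media@".toList, "jobs@".toList, "careers@".toList, "noreply@".toList,
   "no-reply@".toList, "webmaster@".toList, "team@".toList, "office@".toList, "general@".toList,
   "help@".toList, "feedback@".toList, "privacy@".toList]

def junkDomains : List (List Char) :=
  ["example.com".toList, "sentry.io".toList, "w3.org".toList, "schema.org".toList,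
   "wordpress.org".toList, "gravatar.com".toList, "wixpress.com".toList, "google.com".toList,
   "cloudflare.com".toList, "gstatic.com".toList, "facebook.com".toList]

def junkSuffixes : List (List Char) := [".png".toList, ".jpg".toList, ".svg".toList, ".gif".toList]

-- ===== PORT A =====
-- set-iteration order does not matter: the loop only tests whether ANY prefix matches
def is_useful_email (email : String) : Bool :=
  let e := PySem.Chars.lower email.toList
  if junkPrefixes.any (fun p => PySem.Chars.startswith e p) then false
  else
    -- email.split('@')[1] if '@' in email else '' ; the [1] cannot raise when '@' is present
    let domain := if PySem.Chars.isIn ['@'] e then ((PySem.Chars.splitOn e ['@'])[1]?).getD [] else []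
    if junkDomains.contains domain then false
    else if junkSuffixes.any (fun x => PySem.Chars.endswith e x) then false
    else true

-- ===== PORT B =====
def is_useful_email_alt (email : String) : Bool :=
  let e := PySem.Chars.lower email.toList
  let parts := PySem.Chars.splitOn e ['@']
  let junk :=
    (decide (1 < parts.length) && junkPrefixes.contains ((parts.headD []) ++ ['@']))
    || junkDomains.contains (if 1 < parts.length then (parts[1]?).getD [] else [])
    || junkSuffixes.any (fun x => PySem.Chars.endswith e x)
  !junk

-- ===== PRECONDITION & SPEC =====
def Spec_is_useful_email (email : String) (out : Bool) : Prop := out = is_useful_email_alt email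
instance (email : String) (out : Bool) : Decidable (Spec_is_useful_email email out) := by unfold Spec_is_useful_email; infer_instance

-- ===== CLAIM (what is proved, stated in full; the proofs are below) =====
def Claim_equal_is_useful_email : Prop := ∀ (email : String), Dom_is_useful_email email → Spec_is_useful_email email (is_useful_email email)

-- ===== LEMMAS AND PROOFS =====

-- PySem.Chars.splitOn with a single-character separator IS Mathlib's List.splitOnP
lemma splitOn_go_single (c : Char) : ∀ (fuel : Nat) (l cur : List Char) (acc : List (List Char)),
    l.length < fuel →
    PySem.Chars.splitOn.go [c] fuel l cur acc
      = acc.reverse ++ (l.splitOnP (· == c)).modifyHead (fun h => cur.reverse ++ h) := by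
  intro fuel
  induction fuel with
  | zero => intro l cur acc h; omega
  | succ n ih =>
    intro l cur acc h
    cases l with
    | nil => simp [PySem.Chars.splitOn.go, List.splitOnP_nil]
    | cons ch rest =>
      by_cases hc : ch = c
      · subst hc
        have : [ch].isPrefixOf (ch :: rest) = true := by simp [List.isPrefixOf]
        rw [PySem.Chars.splitOn.go] at *
        simp only [this, if_pos, List.length_cons, List.length_nil, List.drop_succ_cons, List.drop_zero]
        rw [ih rest [] (cur.reverse :: acc) (by simpa using Nat.lt_of_succ_lt_succ h)]
        simp only [List.splitOnP_cons, beq_self_eq_true, if_pos, List.reverse_cons,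
          List.reverse_nil, List.nil_append, List.modifyHead_cons, List.append_nil]
        rw [show (fun (h : List Char) => h) = id from rfl, List.modifyHead_id]
        simp
      · have : [c].isPrefixOf (ch :: rest) = false := by
          simp [List.isPrefixOf]; exact fun hh => (hc hh.symm).elim
        rw [PySem.Chars.splitOn.go]
        simp only [this, Bool.false_eq_true, if_neg, not_false_eq_true]
        rw [ih rest (ch :: cur) acc (by simpa using Nat.lt_of_succ_lt_succ h)]
        have hne := List.splitOnP_ne_nil (fun x => x == c) rest
        cases hps : rest.splitOnP (· == c) with
        | nil => exact absurd hps hne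
        | cons hh tt =>
          simp [List.splitOnP_cons, beq_iff_eq, hc, hps, List.modifyHead]

lemma chars_splitOn_single (cs : List Char) (c : Char) :
    PySem.Chars.splitOn cs [c] = cs.splitOnP (· == c) := by
  rw [PySem.Chars.splitOn, splitOn_go_single c (cs.length + 1) cs [] [] (Nat.lt_succ_self _)]
  have hne := List.splitOnP_ne_nil (fun x => x == c) cs
  cases hps : cs.splitOnP (· == c) with
  | nil => exact absurd hps hne
  | cons hh tt => simp [List.modifyHead]

lemma splitOnP_length_gt_one {α : Type} (p : α → Bool) (l : List α) :
    1 < (l.splitOnP p).length ↔ ∃ a ∈ l, p a = true := by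
  induction l with
  | nil => simp [List.splitOnP_nil]
  | cons a l ih =>
    by_cases hp : p a = true
    · have h1 : 1 ≤ (l.splitOnP p).length :=
        List.length_pos_of_ne_nil (List.splitOnP_ne_nil p l)
      simp [List.splitOnP_cons, hp]
      omega
    · simp [List.splitOnP_cons, hp, List.length_modifyHead, ih]

lemma splitOnP_headD {α : Type} (p : α → Bool) (l : List α) :
    (l.splitOnP p).headD [] = l.takeWhile (fun a => !p a) := by
  induction l with
  | nil => simp [List.splitOnP_nil]
  | cons a l ih =>
    by_cases hp : p a = true
    · simp [List.splitOnP_cons, hp]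
    · have hne := List.splitOnP_ne_nil p l
      cases hps : l.splitOnP p with
      | nil => exact absurd hps hne
      | cons hh tt =>
        rw [hps] at ih
        simp [List.splitOnP_cons, hp, hps, List.modifyHead] at *
        exact ih

-- startswith (q ++ "@") ⟷ '@' occurs and the part before the first '@' is exactly q
lemma takeWhile_no_at (q t : List Char) (hq : '@' ∉ q) :
    (q ++ '@' :: t).takeWhile (fun a => !(a == '@')) = q := by
  induction q with
  | nil => simp
  | cons x xs ih =>
    simp only [List.mem_cons, not_or] at hq
    have hx : ¬ x = '@' := fun hh => hq.1 hh.symm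
    simp [hx, ih hq.2]

lemma startswith_concat_at (e q : List Char) (hq : '@' ∉ q) :
    PySem.Chars.startswith e (q ++ ['@']) = true
      ↔ ('@' ∈ e ∧ e.takeWhile (fun a => !(a == '@')) = q) := by
  rw [PySem.Chars.startswith_iff]
  constructor
  · rintro ⟨t, ht⟩
    rw [List.append_assoc] at ht
    subst ht
    exact ⟨by simp, takeWhile_no_at q t hq⟩
  · rintro ⟨hmem, htw⟩
    have hsplit := List.takeWhile_append_dropWhile (p := fun a => !(a == '@')) (l := e)
    have hdne : e.dropWhile (fun a => !(a == '@')) ≠ [] := by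
      intro hnil
      rw [hnil, List.append_nil] at hsplit
      rw [← hsplit] at hmem
      have := List.mem_takeWhile_imp hmem
      simp at this
    cases hd : e.dropWhile (fun a => !(a == '@')) with
    | nil => exact absurd hd hdne
    | cons c t =>
      have hhd : (e.dropWhile (fun a => !(a == '@'))).head hdne = c := by simp only [hd, List.head_cons]
      have hc0 := List.head_dropWhile_not (fun a => !(a == '@')) hdne
      rw [hhd] at hc0
      have hc : c = '@' := by simpa using hc0
      rw [hd] at hsplit
      refine ⟨t, ?_⟩
      rw [List.append_assoc]
      simpa [htw, hc] using hsplit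

-- the ANY-startswith loop over a list of '@'-terminated prefixes is ONE membership test
lemma any_startswith_eq (e : List Char) (L : List (List Char))
    (h : ∀ p ∈ L, ∃ q, p = q ++ ['@'] ∧ '@' ∉ q) :
    L.any (fun p => PySem.Chars.startswith e p)
      = (decide ('@' ∈ e) && L.contains (e.takeWhile (fun a => !(a == '@')) ++ ['@'])) := by
  induction L with
  | nil => simp
  | cons p L ih =>
    obtain ⟨q, rfl, hq⟩ := h p (by simp)
    have ih' := ih (fun p hp => h p (by simp [hp]))
    simp only [List.any_cons, ih', List.contains_cons]
    have hsw : PySem.Chars.startswith e (q ++ ['@'])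
        = (decide ('@' ∈ e) && decide (e.takeWhile (fun a => !(a == '@')) = q)) := by
      by_cases hs : ('@' ∈ e ∧ e.takeWhile (fun a => !(a == '@')) = q)
      · rw [(startswith_concat_at e q hq).mpr hs]
        simp [hs.1, hs.2]
      · have hz : PySem.Chars.startswith e (q ++ ['@']) = false := by
          rcases Bool.eq_false_or_eq_true (PySem.Chars.startswith e (q ++ ['@'])) with ht | hf
          · exact absurd ((startswith_concat_at e q hq).mp ht) hs
          · exact hf
        rw [hz]
        rcases not_and_or.mp hs with h1 | h1 <;> simp [h1]
    rw [hsw]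
    have hbeq : ((e.takeWhile (fun a => !(a == '@')) ++ ['@']) == (q ++ ['@']))
        = decide (e.takeWhile (fun a => !(a == '@')) = q) := by
      rw [Bool.beq_eq_decide_eq]
      simp
    rw [hbeq]
    cases decide ('@' ∈ e) <;> cases decide (e.takeWhile (fun a => !(a == '@')) = q) <;> simp

lemma isIn_at (e : List Char) : PySem.Chars.isIn ['@'] e = decide ('@' ∈ e) := by
  rcases Bool.eq_false_or_eq_true (PySem.Chars.isIn ['@'] e) with ht | hf
  · rw [ht]
    have := (PySem.Chars.isIn_iff_infix _ _).mp ht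
    rw [List.singleton_infix_iff] at this
    simp [this]
  · rw [hf]
    have := (PySem.Chars.isIn_eq_false_iff _ _).mp hf
    rw [List.singleton_infix_iff] at this
    simp [this]

lemma junkPrefixes_shape : ∀ p ∈ junkPrefixes, ∃ q, p = q ++ ['@'] ∧ '@' ∉ q := by
  intro p hp
  have h : p ≠ [] ∧ p.getLast? = some '@' ∧ '@' ∉ p.dropLast := by
    fin_cases hp <;> exact ⟨by decide, by decide, by decide⟩
  exact ⟨p.dropLast, (List.dropLast_append_getLast? '@' h.2.1).symm, h.2.2⟩

-- ===== VERDICT (by name: the statement is the Claim_ definition above) =====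
theorem is_useful_email_spec : Claim_equal_is_useful_email := by
  intro email _
  unfold Spec_is_useful_email
  simp only [is_useful_email, is_useful_email_alt]
  generalize PySem.Chars.lower email.toList = e
  have hsplit := chars_splitOn_single e '@'
  have hlen : (1 < (PySem.Chars.splitOn e ['@']).length) ↔ ('@' ∈ e) := by
    rw [hsplit, splitOnP_length_gt_one]
    constructor
    · rintro ⟨a, ha, hpa⟩
      have ha' : a = '@' := by simpa using hpa
      rwa [ha'] at ha
    · intro hm; exact ⟨'@', hm, by simp⟩
  have hhead : (PySem.Chars.splitOn e ['@']).headD [] = e.takeWhile (fun a => !(a == '@')) := by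
    rw [hsplit, splitOnP_headD]
  have hpref := any_startswith_eq e junkPrefixes junkPrefixes_shape
  rw [hpref, hhead, isIn_at]
  by_cases hm : '@' ∈ e
  · have hl : 1 < (PySem.Chars.splitOn e ['@']).length := hlen.mpr hm
    cases hA : junkPrefixes.contains (e.takeWhile (fun a => !(a == '@')) ++ ['@']) <;>
      cases hB : junkDomains.contains (((PySem.Chars.splitOn e ['@'])[1]?).getD []) <;>
        cases hC : junkSuffixes.any (fun x => PySem.Chars.endswith e x) <;>
          simp [hm, hl]
  · have hl : ¬ 1 < (PySem.Chars.splitOn e ['@']).length := fun hh => hm (hlen.mp hh)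
    cases hB : junkDomains.contains ([] : List Char) <;>
      cases hC : junkSuffixes.any (fun x => PySem.Chars.endswith e x) <;>
        simp [hm, hl]
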